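-- pv_equiv track=rewrite | github.com/aki-nasu/competition | abc_py/agc043/b.py | F
-- ===== SOURCE A (Python) =====
-- def F(n,a,j,t):
--     if n == 0:
--         return t
--     else:
--         b = a%(pow(10,n))
--         k = b//pow(10,n-1)
--         t += abs(j-k)*pow(10,n-1)
--         return F(n-1,b,k,t)
-- ===== SOURCE B (Python) =====
-- def F(n, a, j, t):
--     prev, total, rem = j, t, a
--     for p in range(n, 0, -1):
--         power = pow(10, p - 1)
--         rem %= pow(10, p)
--         digit = rem // power
--         total += abs(prev - digit) * power
--         prev = digit
--     return total
-- ===== Notes on version B (the rewrite author's own statement) =====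
-- stated objective: simpler
-- what changed: Replaced the recursive accumulator-threading with a flat iterative loop over digit positions (local variables prev/total/rem updated in a for-loop).
import Mathlib
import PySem

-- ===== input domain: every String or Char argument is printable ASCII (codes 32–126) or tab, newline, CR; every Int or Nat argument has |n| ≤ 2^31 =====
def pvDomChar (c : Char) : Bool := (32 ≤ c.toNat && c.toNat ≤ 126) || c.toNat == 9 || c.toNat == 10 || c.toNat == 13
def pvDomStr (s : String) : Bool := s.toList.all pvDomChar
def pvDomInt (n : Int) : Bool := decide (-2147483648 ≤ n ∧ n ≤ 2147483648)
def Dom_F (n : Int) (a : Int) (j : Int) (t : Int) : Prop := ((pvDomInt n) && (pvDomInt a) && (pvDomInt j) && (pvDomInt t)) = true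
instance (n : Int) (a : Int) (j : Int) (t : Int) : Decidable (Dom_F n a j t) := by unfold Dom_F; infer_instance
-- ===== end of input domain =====

-- B replaces A's recursion by a flat iterative loop over digit positions (same values, different decomposition).

-- ===== PORT A =====
-- A recurses on n down to 0; for n ≥ 0 (all of Pre_F) the recursion depth is exactly
-- n, so the structural fuel n.toNat makes the port a step-for-step transcription.
def FAgo : Nat → Int → Int → Int → Int
  | 0, _, _, t => t
  | Nat.succ m, a, j, t =>
      let b := PySem.Int.mod a (10 ^ (m + 1))
      let k := PySem.Int.floordiv b (10 ^ m)
      FAgo m b k (t + |j - k| * 10 ^ m)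

def F (n : Int) (a : Int) (j : Int) (t : Int) : Int := FAgo n.toNat a j t

-- ===== PORT B =====
-- one loop iteration of Source B: state (prev, total, rem)
def FAltStep (st : Int × Int × Int) (p : Int) : Int × Int × Int :=
  let prev := st.1
  let total := st.2.1
  let rem := st.2.2
  let power := (10 : Int) ^ (p - 1).toNat
  let rem' := PySem.Int.mod rem (10 ^ p.toNat)
  let digit := PySem.Int.floordiv rem' power
  (digit, total + |prev - digit| * power, rem')

def F_alt (n : Int) (a : Int) (j : Int) (t : Int) : Int :=
  ((PySem.List.pyRange n 0 (-1)).foldl FAltStep (j, t, a)).2.1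

-- ===== PRECONDITION & SPEC =====
-- Pre_F excludes n < 0, on which Python A recurses forever (RecursionError); B would return t there.
def Pre_F (n : Int) (a : Int) (j : Int) (t : Int) : Prop := 0 ≤ n
instance (n : Int) (a : Int) (j : Int) (t : Int) : Decidable (Pre_F n a j t) := by unfold Pre_F; infer_instance
def pvWitness_F : Int × Int × Int × Int := (3, 407, 2, 0)

def Spec_F (n : Int) (a : Int) (j : Int) (t : Int) (out : Int) : Prop := out = F_alt n a j t
instance (n : Int) (a : Int) (j : Int) (t : Int) (out : Int) : Decidable (Spec_F n a j t out) := by unfold Spec_F; infer_instance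

-- ===== CLAIM (what is proved, stated in full; the proofs are below) =====
def Claim_equal_F : Prop := ∀ (n : Int) (a : Int) (j : Int) (t : Int), Dom_F n a j t → Pre_F n a j t → Spec_F n a j t (F n a j t)

-- ===== LEMMAS AND PROOFS =====
theorem loop_eq (m : Nat) : ∀ (a j t : Int),
    ((PySem.List.pyRange (m : Int) 0 (-1)).foldl FAltStep (j, t, a)).2.1 = FAgo m a j t := by
  induction m with
  | zero =>
      intro a j t
      rw [PySem.List.pyRange_neg_one_eq_nil (by omega)]
      rfl
  | succ m ih =>
      intro a j t
      rw [show ((m + 1 : Nat) : Int) = (m : Int) + 1 by push_cast; ring,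
          PySem.List.pyRange_neg_one_cons (by omega)]
      simp only [List.foldl_cons]
      have h2 : ((m : Int) + 1).toNat = m + 1 := by omega
      simp only [FAltStep, h2, show (m : Int) + 1 - 1 = (m : Int) by ring]
      exact ih _ _ _

-- ===== VERDICT (by name: the statement is the Claim_ definition above) =====
theorem F_spec : Claim_equal_F := by
  intro n a j t _ hpre
  unfold Spec_F F F_alt
  have hn : ((n.toNat : Nat) : Int) = n := Int.toNat_of_nonneg hpre
  rw [← hn, loop_eq, Int.toNat_natCast]
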